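-- pv_equiv track=rewrite | github.com/haohaocreates/PR-img2txt-comfyui-nodes-ab6191ac | src/img2txt_node.py | merge_captions
-- ===== SOURCE A (Python) =====
-- def merge_captions(captions: list) -> str:
--     """Merge captions from multiple models into one string.
--     Necessary because we can expect the generated captions will generally
--     be comma-separated fragments ordered by relevance - so we should combine
--     fragments in an alternating order."""
--     merged_caption = ""
--     captions = [c.split(",") for c in captions]
--     for i in range(max(len(c) for c in captions)):
--         for j in range(len(captions)):
--             if i < len(captions[j]) and captions[j][i].strip() != "":
--                 merged_caption += captions[j][i].strip() + ", "
--     return merged_caption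
-- ===== SOURCE B (Python) =====
-- def merge_captions(captions: list) -> str:
--     """Merge captions from multiple models into one string.
--     Collect every non-empty stripped fragment in a single row-major pass,
--     keyed by its column-major rank i * len(captions) + j, then sort once
--     by that rank and join."""
--     n = len(captions)
--     keyed = []
--     for j, c in enumerate(captions):
--         for i, frag in enumerate(c.split(",")):
--             s = frag.strip()
--             if s:
--                 keyed.append((i * n + j, s))
--     keyed.sort(key=lambda kv: kv[0])
--     return "".join(s + ", " for _, s in keyed)
-- ===== Notes on version B (the rewrite author's own statement) =====
-- stated objective: alternative
-- what changed: Instead of A's column-major nested index loops (range over the max fragment count with per-caption bounds checks and string +=), B makes one row-major pass over each caption's own fragments, tags each kept fragment with its column-major rank i*len(captions)+j, sorts once by that rank and joins.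
import Mathlib
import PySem

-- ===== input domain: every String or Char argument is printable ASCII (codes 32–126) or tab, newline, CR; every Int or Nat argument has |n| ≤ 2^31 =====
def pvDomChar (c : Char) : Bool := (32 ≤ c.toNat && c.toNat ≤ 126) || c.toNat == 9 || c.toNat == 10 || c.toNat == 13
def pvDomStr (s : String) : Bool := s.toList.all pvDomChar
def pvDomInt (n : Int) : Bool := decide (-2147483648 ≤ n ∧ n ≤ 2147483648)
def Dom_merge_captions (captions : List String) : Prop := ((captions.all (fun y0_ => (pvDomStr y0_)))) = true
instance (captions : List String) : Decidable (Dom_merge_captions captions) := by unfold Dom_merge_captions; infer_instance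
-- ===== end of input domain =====

-- B collects every kept fragment in one row-major pass, keyed by its column-major rank
-- i*len(captions)+j, then sorts once by that rank and joins — instead of A's nested
-- column-major index loops with string +=  (alternative algorithm, not claimed faster).


-- ===== PORT A =====
-- c.split(",") : the separator is a non-empty literal, so PySem.Str.split? is always `some`.
def pySplitComma (c : String) : List String := (PySem.Str.split? c ",").getD []

-- Literal port of A: `max(len(c) for c in captions)` raises ValueError on an empty list
-- (excluded by Pre_); on non-empty input it equals the fold of Nat.max below.
def merge_captions (captions : List String) : String :=
  let caps := captions.map pySplitComma
  let m := (caps.map List.length).foldl Nat.max 0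
  (List.range m).foldl (fun acc i =>
    (List.range caps.length).foldl (fun acc j =>
      if i < (caps.getD j []).length ∧ PySem.Str.strip ((caps.getD j []).getD i "") ≠ "" then
        acc ++ PySem.Str.strip ((caps.getD j []).getD i "") ++ ", "
      else acc) acc) ""

-- ===== PORT B =====
-- Literal port of Source B: row-major collection of (i*n+j, stripped fragment), stable sort
-- by the integer key, one final join.
def merge_captions_alt (captions : List String) : String :=
  let n : Int := captions.length
  let keyed := (PySem.List.enumerate captions).foldl (fun acc jc =>
    (PySem.List.enumerate (pySplitComma jc.2)).foldl (fun acc ifrag =>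
      let s := PySem.Str.strip ifrag.2
      if s ≠ "" then acc ++ [(ifrag.1 * n + jc.1, s)] else acc) acc) []
  let srt := PySem.List.sorted keyed (fun kv => kv.1) false
  PySem.Str.join "" (srt.map (fun kv => kv.2 ++ ", "))

-- ===== PRECONDITION & SPEC =====
-- Pre_ excludes exactly the empty list, on which Python A raises ValueError
-- (max() of an empty sequence). B returns "" there; no value of A exists to match.
def Pre_merge_captions (captions : List String) : Prop := captions ≠ []
instance (captions : List String) : Decidable (Pre_merge_captions captions) := by
  unfold Pre_merge_captions; infer_instance

def pvWitness_merge_captions : List String := ["a, b", "c"]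

def Spec_merge_captions (captions : List String) (out : String) : Prop := out = merge_captions_alt captions
instance (captions : List String) (out : String) : Decidable (Spec_merge_captions captions out) := by unfold Spec_merge_captions; infer_instance

-- ===== CLAIM (what is proved, stated in full; the proofs are below) =====
def Claim_equal_merge_captions : Prop := ∀ (captions : List String), Dom_merge_captions captions → Pre_merge_captions captions → Spec_merge_captions captions (merge_captions captions)

-- ===== LEMMAS AND PROOFS =====

-- shared vocabulary: the stripped fragment an (optional) raw fragment contributes, bare and with ", "
def optG (f? : Option String) : Option String :=
  f?.bind (fun f => if PySem.Str.strip f ≠ "" then some (PySem.Str.strip f) else none)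

def optF (f? : Option String) : Option String := (optG f?).map (· ++ ", ")

-- fragment i of one caption, as an Option ( = c[i] if it exists)
def fragAt (c : List String) (i : Nat) : Option String := (c.drop i).head?

def colStrings (caps : List (List String)) (i : Nat) : List String :=
  caps.filterMap (fun c => optF (fragAt c i))

theorem colStrings_cons (c : List String) (t : List (List String)) (i : Nat) :
    colStrings (c :: t) i = (optF (fragAt c i)).toList ++ colStrings t i := by
  simp only [colStrings, List.filterMap_cons]
  cases optF (fragAt c i) <;> simp

theorem fragAt_of_lt (c : List String) (i : Nat) (h : i < c.length) :
    fragAt c i = some (c.getD i "") := by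
  unfold fragAt
  induction c generalizing i with
  | nil => simp at h
  | cons a t ih =>
      cases i with
      | zero => simp
      | succ j => simpa using ih j (by simpa using h)

theorem fragAt_of_ge (c : List String) (i : Nat) (h : ¬ i < c.length) :
    fragAt c i = none := by
  unfold fragAt; rw [List.drop_eq_nil_of_le (by omega)]; rfl

-- "".join is plain concatenation
theorem join_empty_nil : PySem.Str.join "" ([] : List String) = "" := by
  apply String.toList_inj.mp
  simp [PySem.Str.toList_join, PySem.Chars.join_nil]

theorem join_empty_cons (x : String) (l : List String) :
    PySem.Str.join "" (x :: l) = x ++ PySem.Str.join "" l := by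
  apply String.toList_inj.mp
  simp only [PySem.Str.toList_join, List.map_cons, String.toList_append]
  cases l <;>
    simp [PySem.Chars.join_nil, PySem.Chars.join_singleton, PySem.Chars.join_cons_cons]

theorem join_empty_append (a b : List String) :
    PySem.Str.join "" (a ++ b) = PySem.Str.join "" a ++ PySem.Str.join "" b := by
  induction a with
  | nil => simp [join_empty_nil]
  | cons x t ih => simp [join_empty_cons, ih, String.append_assoc]

-- A's inner index loop over j is a loop over the fragment lists themselves
theorem foldl_range_getD {α β : Type} (l : List α) (d : α) (g : β → α → β) (b : β) :
    (List.range l.length).foldl (fun acc j => g acc (l.getD j d)) b = l.foldl g b := by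
  induction l generalizing b with
  | nil => simp
  | cons c t ih =>
      simp only [List.length_cons, List.range_succ_eq_map, List.foldl_cons, List.foldl_map,
        List.getD_cons_zero, List.getD_cons_succ]
      exact ih (g b c)

theorem innerA_eq (caps : List (List String)) (i : Nat) (acc : String) :
    caps.foldl (fun acc c =>
        if i < c.length ∧ PySem.Str.strip (c.getD i "") ≠ "" then
          acc ++ PySem.Str.strip (c.getD i "") ++ ", "
        else acc) acc
      = acc ++ PySem.Str.join "" (colStrings caps i) := by
  induction caps generalizing acc with
  | nil => simp [colStrings, join_empty_nil]
  | cons c t ih =>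
      rw [List.foldl_cons, colStrings_cons]
      by_cases hlt : i < c.length
      · rw [fragAt_of_lt c i hlt]
        by_cases hs : PySem.Str.strip (c.getD i "") ≠ ""
        · have hopt : optF (some (c.getD i "")) =
              some (PySem.Str.strip (c.getD i "") ++ ", ") := by
            rw [optF, optG]; simp only [Option.bind_some, if_pos hs, Option.map_some]
          rw [if_pos ⟨hlt, hs⟩, ih, hopt]
          simp only [Option.toList_some, List.singleton_append, join_empty_cons,
            String.append_assoc]
        · have hopt : optF (some (c.getD i "")) = none := by
            rw [optF, optG]; simp only [Option.bind_some, if_neg hs, Option.map_none]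
          rw [if_neg (by tauto), ih, hopt]
          simp
      · rw [if_neg (by tauto), ih, fragAt_of_ge c i hlt]
        simp [optF, optG]

-- A's outer loop, as a join of the concatenated columns
theorem outerA_eq (caps : List (List String)) (m : Nat) :
    (List.range m).foldl (fun acc i =>
      (List.range caps.length).foldl (fun acc j =>
        if i < (caps.getD j []).length ∧ PySem.Str.strip ((caps.getD j []).getD i "") ≠ "" then
          acc ++ PySem.Str.strip ((caps.getD j []).getD i "") ++ ", "
        else acc) acc) ""
      = PySem.Str.join "" ((List.range m).flatMap (colStrings caps)) := by
  induction m with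
  | zero => simp [join_empty_nil]
  | succ n ih =>
      rw [List.range_succ, List.foldl_append, List.foldl_cons, List.foldl_nil, ih,
        foldl_range_getD caps []
          (fun acc c =>
            if n < c.length ∧ PySem.Str.strip (c.getD n "") ≠ "" then
              acc ++ PySem.Str.strip (c.getD n "") ++ ", "
            else acc),
        innerA_eq, List.flatMap_append, join_empty_append]
      simp

-- the maximum fragment count, in recursive form
def maxF : List (List String) → Nat
  | [] => 0
  | c :: t => Nat.max c.length (maxF t)

theorem foldl_max_eq (fs : List (List String)) (a : Nat) :
    (fs.map List.length).foldl Nat.max a = Nat.max a (maxF fs) := by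
  induction fs generalizing a with
  | nil => simp [maxF]
  | cons c t ih =>
      simp only [List.map_cons, List.foldl_cons, maxF, ih, Nat.max_assoc]

theorem len_le_maxF (fs : List (List String)) (c : List String) (h : c ∈ fs) :
    c.length ≤ maxF fs := by
  induction fs with
  | nil => simp at h
  | cons d t ih =>
      rcases List.mem_cons.mp h with h | h
      · subst h; exact Nat.le_max_left _ _
      · exact le_trans (ih h) (Nat.le_max_right _ _)

-- one keyed entry of the grid: F caps n i j
def gridF (caps : List (List String)) (n : Int) (i j : Nat) : Option (Int × String) :=
  (optG (fragAt (caps.getD j []) i)).map (fun s => ((i : Int) * n + (j : Int), s))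

-- B's keyed list, rewritten as a row-major grid filterMap
def rowKeyed (caps : List (List String)) (n : Int) (m : Nat) : List (Int × String) :=
  (List.range caps.length).flatMap (fun j => (List.range m).filterMap (fun i => gridF caps n i j))

-- the same entries in column-major order
def colKeyed (caps : List (List String)) (n : Int) (m : Nat) : List (Int × String) :=
  (List.range m).flatMap (fun i => (List.range caps.length).filterMap (fun j => gridF caps n i j))

-- generic: flatMap of cons ~ heads ++ flatMap of tails
theorem flatMap_cons_perm {α β : Type} (l : List α) (x : α → β) (Y : α → List β) :
    (l.flatMap (fun b => x b :: Y b)).Perm (l.map x ++ l.flatMap Y) := by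
  induction l with
  | nil => simp
  | cons b t ih =>
      simp only [List.flatMap_cons, List.map_cons, List.cons_append]
      refine List.Perm.cons _ ?_
      refine (ih.append_left (Y b)).trans ?_
      rw [← List.append_assoc, ← List.append_assoc]
      exact (List.perm_append_comm.append_right _)

-- generic transposition permutation for double flatMap/map grids
theorem flatMap_map_swap_perm {α β γ : Type} (l1 : List α) (l2 : List β) (f : α → β → γ) :
    (l1.flatMap (fun a => l2.map (f a))).Perm (l2.flatMap (fun b => l1.map (fun a => f a b))) := by
  induction l1 with
  | nil => simp
  | cons a t ih =>
      simp only [List.flatMap_cons, List.map_cons]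
      refine (List.Perm.append_left _ ih).trans ?_
      exact (flatMap_cons_perm l2 (f a) (fun b => t.map (fun a => f a b))).symm

theorem rowKeyed_perm_colKeyed (caps : List (List String)) (n : Int) (m : Nat) :
    (colKeyed caps n m).Perm (rowKeyed caps n m) := by
  unfold rowKeyed colKeyed
  have h1 : ∀ j, (List.range m).filterMap (fun i => gridF caps n i j)
      = ((List.range m).map (fun i => (i, j))).filterMap (fun p => gridF caps n p.1 p.2) := by
    intro j; rw [List.filterMap_map]; simp [Function.comp]
  have h2 : ∀ i, (List.range caps.length).filterMap (fun j => gridF caps n i j)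
      = ((List.range caps.length).map (fun j => (i, j))).filterMap
          (fun p => gridF caps n p.1 p.2) := by
    intro i; rw [List.filterMap_map]; simp [Function.comp]
  simp only [funext h1, funext h2, ← List.filterMap_flatMap]
  exact ((flatMap_map_swap_perm (List.range m) (List.range caps.length)
    (fun i j => (i, j))).filterMap _)

-- keys inside gridF
theorem key_of_mem_gridF (caps : List (List String)) (n : Int) (i j : Nat)
    (x : Int × String) (h : x ∈ gridF caps n i j) : x.1 = (i : Int) * n + (j : Int) := by
  unfold gridF at h
  rcases Option.map_eq_some_iff.mp (Option.mem_def.mp h) with ⟨s, _, hx⟩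
  rw [← hx]

theorem key_lt_key (i i' j j' nn : Nat) (hij : i < i' ∨ (i = i' ∧ j < j')) (hj : j < nn) :
    (i : Int) * (nn : Int) + (j : Int) < (i' : Int) * (nn : Int) + (j' : Int) := by
  rcases hij with h | ⟨h, hjj⟩
  · have h1 : (i + 1) * nn ≤ i' * nn := Nat.mul_le_mul_right nn h
    rw [Nat.add_mul, Nat.one_mul] at h1
    have : i * nn + j < i' * nn + j' := by omega
    exact_mod_cast this
  · subst h; have : i * nn + j < i * nn + j' := by omega
    exact_mod_cast this

-- pairwise over a flatMap of range blocks
theorem pairwise_flatMap_range {α : Type} {R : α → α → Prop} (g : Nat → List α) (m : Nat)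
    (h1 : ∀ i, (g i).Pairwise R)
    (h2 : ∀ i i', i < i' → ∀ a ∈ g i, ∀ b ∈ g i', R a b) :
    ((List.range m).flatMap g).Pairwise R := by
  induction m with
  | zero => simp
  | succ k ih =>
      rw [List.range_succ, List.flatMap_append, List.flatMap_cons, List.flatMap_nil,
        List.append_nil, List.pairwise_append]
      refine ⟨ih, h1 k, ?_⟩
      intro a ha b hb
      rcases List.mem_flatMap.mp ha with ⟨i, hi, hai⟩
      exact h2 i k (List.mem_range.mp hi) a hai b hb

theorem colKeyed_pairwise (caps : List (List String)) (m : Nat) :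
    (colKeyed caps (caps.length : Int) m).Pairwise (fun a b => a.1 < b.1) := by
  unfold colKeyed
  apply pairwise_flatMap_range
  · intro i
    rw [List.pairwise_filterMap]
    have hp : (List.range caps.length).Pairwise (· < ·) := List.pairwise_lt_range
    refine hp.imp_of_mem ?_
    intro j j' hj _ hjj x hx y hy
    rw [key_of_mem_gridF _ _ _ _ _ hx, key_of_mem_gridF _ _ _ _ _ hy]
    exact key_lt_key i i j j' caps.length (Or.inr ⟨rfl, hjj⟩) (List.mem_range.mp hj)
  · intro i i' hii a ha b hb
    rcases List.mem_filterMap.mp ha with ⟨j, hj, haj⟩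
    rcases List.mem_filterMap.mp hb with ⟨j', _, hbj⟩
    rw [key_of_mem_gridF _ _ _ _ _ haj, key_of_mem_gridF _ _ _ _ _ hbj]
    exact key_lt_key i i' j j' caps.length (Or.inl hii) (List.mem_range.mp hj)

-- B's keyed loop equals rowKeyed (with m = maxF caps)
theorem enumerate_flatMap {α β : Type} (xs : List α) (s : Int) (d : α) (g : Int × α → List β) :
    (PySem.List.enumerate xs s).flatMap g
      = (List.range xs.length).flatMap (fun j : Nat => g (s + (j : Int), xs.getD j d)) := by
  induction xs generalizing s with
  | nil => simp [PySem.List.enumerate_nil]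
  | cons a t ih =>
      rw [PySem.List.enumerate_cons, List.flatMap_cons, ih (s + 1)]
      rw [List.length_cons, List.range_succ_eq_map, List.flatMap_cons, List.flatMap_map]
      simp only [List.getD_cons_zero, List.getD_cons_succ]
      congr 1
      · norm_num
      · congr 1; funext j; congr 2; push_cast; ring

theorem enumerate_filterMap {α β : Type} (xs : List α) (s : Int) (d : α) (g : Int × α → Option β) :
    (PySem.List.enumerate xs s).filterMap g
      = (List.range xs.length).filterMap (fun j : Nat => g (s + (j : Int), xs.getD j d)) := by
  induction xs generalizing s with
  | nil => simp [PySem.List.enumerate_nil]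
  | cons a t ih =>
      rw [PySem.List.enumerate_cons, List.filterMap_cons, List.length_cons,
        List.range_succ_eq_map, List.filterMap_cons, List.filterMap_map, ih (s + 1)]
      simp only [List.getD_cons_zero, List.getD_cons_succ, Function.comp]
      have h0 : g (s + ((0 : Nat) : Int), a) = g (s, a) := by norm_num
      have hf : (fun j : Nat => g (s + 1 + (j : Int), t.getD j d))
          = fun j : Nat => g (s + ((j + 1 : Nat) : Int), t.getD j d) := by
        funext j; congr 2; push_cast; ring
      rw [h0, hf]

-- one caption's inner loop, extended to the full column range m
theorem innerB_eq (c : List String) (n : Int) (j : Nat) (m : Nat) (h : c.length ≤ m) :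
    (PySem.List.enumerate c).filterMap (fun ifrag =>
        if PySem.Str.strip ifrag.2 ≠ "" then
          some (ifrag.1 * n + (j : Int), PySem.Str.strip ifrag.2)
        else none)
      = (List.range m).filterMap (fun i =>
          (optG (fragAt c i)).map (fun s => ((i : Int) * n + (j : Int), s))) := by
  rw [show (PySem.List.enumerate c) = PySem.List.enumerate c 0 from rfl,
    enumerate_filterMap c 0 "" _]
  have hsplit : m = c.length + (m - c.length) := by omega
  rw [hsplit, List.range_add, List.filterMap_append]
  have htail : ((List.range (m - c.length)).map (fun x => c.length + x)).filterMap
      (fun i => (optG (fragAt c i)).map (fun s => ((i : Int) * n + (j : Int), s))) = [] := by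
    rw [List.filterMap_map]
    apply List.filterMap_eq_nil_iff.mpr
    intro i _
    simp only [Function.comp_apply]
    rw [fragAt_of_ge c _ (by omega)]
    rfl
  rw [htail, List.append_nil]
  apply List.filterMap_congr
  intro i hi
  have hlt : i < c.length := List.mem_range.mp hi
  rw [fragAt_of_lt c i hlt]
  simp only [Int.zero_add, optG, Option.bind_some]
  by_cases hs : PySem.Str.strip (c.getD i "") ≠ ""
  · rw [if_pos hs, if_pos hs]; rfl
  · rw [if_neg hs, if_neg hs]; rfl

-- the B-side fold builds exactly rowKeyed
theorem keyed_eq_rowKeyed (captions : List String) :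
    ((PySem.List.enumerate captions).foldl (fun acc jc =>
        (PySem.List.enumerate (pySplitComma jc.2)).foldl (fun acc ifrag =>
          if PySem.Str.strip ifrag.2 ≠ "" then
            acc ++ [(ifrag.1 * (captions.length : Int) + jc.1, PySem.Str.strip ifrag.2)]
          else acc) acc) ([] : List (Int × String)))
      = rowKeyed (captions.map pySplitComma) (captions.length : Int)
          (maxF (captions.map pySplitComma)) := by
  set caps := captions.map pySplitComma with hcaps
  set n : Int := (captions.length : Int)
  set m := maxF caps
  -- inner fold → filterMap
  have hinner : ∀ (jc : Int × String) (acc : List (Int × String)),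
      (PySem.List.enumerate (pySplitComma jc.2)).foldl (fun acc ifrag =>
          if PySem.Str.strip ifrag.2 ≠ "" then
            acc ++ [(ifrag.1 * n + jc.1, PySem.Str.strip ifrag.2)]
          else acc) acc
        = acc ++ (PySem.List.enumerate (pySplitComma jc.2)).filterMap (fun ifrag =>
            if PySem.Str.strip ifrag.2 ≠ "" then
              some (ifrag.1 * n + jc.1, PySem.Str.strip ifrag.2)
            else none) := by
    intro jc acc
    induction (PySem.List.enumerate (pySplitComma jc.2)) generalizing acc with
    | nil => simp
    | cons p t ih =>
        rw [List.foldl_cons, List.filterMap_cons]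
        by_cases hs : PySem.Str.strip p.2 ≠ ""
        · rw [if_pos hs, if_pos hs, ih]; simp
        · rw [if_neg hs, if_neg hs, ih]
  -- outer fold → flatMap
  have houter : ∀ (acc : List (Int × String)),
      (PySem.List.enumerate captions).foldl (fun acc jc =>
          acc ++ (PySem.List.enumerate (pySplitComma jc.2)).filterMap (fun ifrag =>
            if PySem.Str.strip ifrag.2 ≠ "" then
              some (ifrag.1 * n + jc.1, PySem.Str.strip ifrag.2)
            else none)) acc
        = acc ++ (PySem.List.enumerate captions).flatMap (fun jc =>
            (PySem.List.enumerate (pySplitComma jc.2)).filterMap (fun ifrag =>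
              if PySem.Str.strip ifrag.2 ≠ "" then
                some (ifrag.1 * n + jc.1, PySem.Str.strip ifrag.2)
              else none)) :=
    fun acc => PySem.List.foldl_append_eq_flatMap _ _ _
  have hfold : (PySem.List.enumerate captions).foldl (fun acc jc =>
      (PySem.List.enumerate (pySplitComma jc.2)).foldl (fun acc ifrag =>
        if PySem.Str.strip ifrag.2 ≠ "" then
          acc ++ [(ifrag.1 * n + jc.1, PySem.Str.strip ifrag.2)]
        else acc) acc) ([] : List (Int × String))
      = (PySem.List.enumerate captions).flatMap (fun jc =>
          (PySem.List.enumerate (pySplitComma jc.2)).filterMap (fun ifrag =>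
            if PySem.Str.strip ifrag.2 ≠ "" then
              some (ifrag.1 * n + jc.1, PySem.Str.strip ifrag.2)
            else none)) := by
    have hfun : (fun (acc : List (Int × String)) (jc : Int × String) =>
        (PySem.List.enumerate (pySplitComma jc.2)).foldl (fun acc ifrag =>
          if PySem.Str.strip ifrag.2 ≠ "" then
            acc ++ [(ifrag.1 * n + jc.1, PySem.Str.strip ifrag.2)]
          else acc) acc)
        = fun acc jc => acc ++ (PySem.List.enumerate (pySplitComma jc.2)).filterMap (fun ifrag =>
            if PySem.Str.strip ifrag.2 ≠ "" then
              some (ifrag.1 * n + jc.1, PySem.Str.strip ifrag.2)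
            else none) :=
      funext fun acc => funext fun jc => hinner jc acc
    rw [hfun, houter, List.nil_append]
  rw [hfold,
    show (PySem.List.enumerate captions) = PySem.List.enumerate captions 0 from rfl,
    enumerate_flatMap captions 0 "" _]
  unfold rowKeyed
  have hlen : caps.length = captions.length := by rw [hcaps, List.length_map]
  rw [hlen]
  apply List.flatMap_congr
  intro j hj
  have hlt : j < captions.length := List.mem_range.mp hj
  have hgetD : caps.getD j [] = pySplitComma (captions.getD j "") := by
    rw [hcaps]
    rw [List.getD_eq_getElem?_getD, List.getD_eq_getElem?_getD,
      List.getElem?_map]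
    rw [List.getElem?_eq_getElem hlt]
    rfl
  have hmem : caps.getD j [] ∈ caps := by
    rw [List.getD_eq_getElem?_getD, List.getElem?_eq_getElem (by omega : j < caps.length)]
    exact List.getElem_mem _
  have hle : (caps.getD j []).length ≤ m := len_le_maxF caps _ hmem
  have := innerB_eq (caps.getD j []) n j m hle
  rw [hgetD] at this
  simp only [Int.zero_add] at this ⊢
  rw [this]
  unfold gridF
  rw [hgetD]

-- snd of a filterMap over gridF is a column of bare stripped fragments
theorem filterMap_range_getD' {α β : Type} (l : List α) (d : α) (h : α → Option β) :
    (List.range l.length).filterMap (fun j => h (l.getD j d)) = l.filterMap h := by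
  induction l with
  | nil => simp
  | cons c t ih =>
      rw [List.length_cons, List.range_succ_eq_map, List.filterMap_cons, List.filterMap_map,
        List.filterMap_cons]
      simp only [List.getD_cons_zero, List.getD_cons_succ, Function.comp_def]
      simp only [List.getD_eq_getElem?_getD] at ih ⊢
      cases h c <;> simp [ih]

theorem col_snd (caps : List (List String)) (n : Int) (i : Nat) :
    (((List.range caps.length).filterMap (fun j => gridF caps n i j)).map Prod.snd)
      = caps.filterMap (fun c => optG (fragAt c i)) := by
  rw [List.map_filterMap]
  have h1 : (fun j => Option.map Prod.snd (gridF caps n i j))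
      = fun j => optG (fragAt (caps.getD j []) i) := by
    funext j; unfold gridF
    cases optG (fragAt (caps.getD j []) i) <;> rfl
  rw [h1]
  exact filterMap_range_getD' caps [] (fun c => optG (fragAt c i))

theorem colKeyed_snd (caps : List (List String)) (n : Int) (m : Nat) :
    ((colKeyed caps n m).map (fun kv => kv.2 ++ ", ")) = (List.range m).flatMap (colStrings caps) := by
  unfold colKeyed
  rw [List.map_flatMap]
  apply List.flatMap_congr
  intro i _
  rw [show (fun kv : Int × String => kv.2 ++ ", ") = (fun s => s ++ ", ") ∘ Prod.snd from rfl,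
    ← List.map_map, col_snd, colStrings, List.map_filterMap]
  rfl

-- ===== VERDICT (by name: the statement is the Claim_ definition above) =====
theorem merge_captions_spec : Claim_equal_merge_captions := by
  intro captions _ _
  unfold Spec_merge_captions
  simp only [merge_captions, merge_captions_alt]
  rw [outerA_eq, foldl_max_eq]
  have hz : Nat.max 0 (maxF (captions.map pySplitComma)) = maxF (captions.map pySplitComma) := by
    simp
  rw [hz]
  set caps := captions.map pySplitComma with hcaps
  set m := maxF caps with hm
  rw [keyed_eq_rowKeyed]
  have hlen : caps.length = captions.length := by rw [hcaps]; exact List.length_map _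
  have hpw := colKeyed_pairwise caps m
  rw [hlen] at hpw
  have hsorted : PySem.List.sorted (rowKeyed caps (captions.length : Int) m)
      (fun kv => kv.1) false = colKeyed caps (captions.length : Int) m :=
    PySem.List.sorted_eq_of_perm_of_pairwise_lt _ _ _
      (rowKeyed_perm_colKeyed caps (captions.length : Int) m) hpw
  rw [hsorted, colKeyed_snd]
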